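-- pv_equiv track=rewrite | github.com/EmpGator/cs-fantasy | fantasy/models/core.py | _generate_leetspeak_alias
-- ===== SOURCE A (Python) =====
-- def _generate_leetspeak_alias(name):
--     """Generates a common leetspeak-to-text alias."""
--     mapping = {
--         "1": "i",
--         "3": "e",
--         "4": "a",
--         "5": "s",
--         "0": "o",
--         "@": "a",
--         "$": "s",
--         "+": "t",
--         "_": "",
--     }
--     alias = name.lower()
--     for char, replacement in mapping.items():
--         alias = alias.replace(char, replacement)
--     return alias
-- ===== SOURCE B (Python) =====
-- def _generate_leetspeak_alias(name):
--     """Generates a common leetspeak-to-text alias."""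
--     out = []
--     for ch in name:
--         o = ord(ch)
--         if 65 <= o <= 90:
--             ch = chr(o + 32)
--         if ch == "1":
--             out.append("i")
--         elif ch == "3":
--             out.append("e")
--         elif ch == "4":
--             out.append("a")
--         elif ch == "5":
--             out.append("s")
--         elif ch == "0":
--             out.append("o")
--         elif ch == "@":
--             out.append("a")
--         elif ch == "$":
--             out.append("s")
--         elif ch == "+":
--             out.append("t")
--         elif ch != "_":
--             out.append(ch)
--     return "".join(out)
-- ===== Notes on version B (the rewrite author's own statement) =====
-- stated objective: alternative
-- what changed: Instead of lowercasing the whole string and then running nine sequential full-string .replace passes over a dict, B makes one fused pass with an explicit accumulator: per character it lowercases by ASCII arithmetic and picks the substitution (or drop for '_') with an if/elif chain, then joins; correct because every key and replacement is a single character and no replacement is itself a key.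
import Mathlib
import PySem

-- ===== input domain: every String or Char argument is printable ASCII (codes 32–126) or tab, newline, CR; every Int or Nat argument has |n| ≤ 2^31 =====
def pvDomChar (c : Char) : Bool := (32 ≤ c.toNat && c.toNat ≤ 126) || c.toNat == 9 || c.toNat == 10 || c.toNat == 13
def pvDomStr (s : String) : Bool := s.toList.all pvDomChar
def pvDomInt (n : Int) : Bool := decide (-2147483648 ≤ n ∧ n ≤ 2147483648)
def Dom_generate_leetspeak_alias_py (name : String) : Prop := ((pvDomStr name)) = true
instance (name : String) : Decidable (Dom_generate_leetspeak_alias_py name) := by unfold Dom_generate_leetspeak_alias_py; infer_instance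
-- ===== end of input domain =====

-- B fuses A's lower() pass and nine sequential full-string .replace passes into one
-- accumulator pass: per character, ASCII-arithmetic lowering plus an if/elif chain
-- (no dict, no replace); exact on the ASCII domain these theorems quantify over.


-- ===== PORT A =====
-- the literal dict from A, in insertion order
def leetMappingA : PySem.Dict String String :=
  PySem.Dict.mk [("1", "i"), ("3", "e"), ("4", "a"), ("5", "s"), ("0", "o"),
                 ("@", "a"), ("$", "s"), ("+", "t"), ("_", "")]

def generate_leetspeak_alias_py (name : String) : String :=
  -- alias = name.lower(); for char, replacement in mapping.items(): alias = alias.replace(char, replacement)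
  leetMappingA.items.foldl (fun s p => PySem.Str.replace s p.1 p.2) (PySem.Str.lower name)

-- ===== PORT B =====
-- B's loop: out accumulator; per char, ASCII lowering (65 ≤ ord ≤ 90 → +32), then the if/elif chain
def leetLoopB : List Char → List Char → List Char
  | out, [] => out
  | out, ch :: rest =>
      let o := ch.toNat
      let ch := if 65 ≤ o ∧ o ≤ 90 then Char.ofNat (o + 32) else ch
      leetLoopB
        (if ch = '1' then out ++ ['i']
         else if ch = '3' then out ++ ['e']
         else if ch = '4' then out ++ ['a']
         else if ch = '5' then out ++ ['s']
         else if ch = '0' then out ++ ['o']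
         else if ch = '@' then out ++ ['a']
         else if ch = '$' then out ++ ['s']
         else if ch = '+' then out ++ ['t']
         else if ch ≠ '_' then out ++ [ch]
         else out) rest

-- "".join(out) over single-character pieces = String.ofList
def generate_leetspeak_alias_py_alt (name : String) : String :=
  String.ofList (leetLoopB [] name.toList)

-- ===== PRECONDITION & SPEC =====
def Spec_generate_leetspeak_alias_py (name : String) (out : String) : Prop := out = generate_leetspeak_alias_py_alt name
instance (name : String) (out : String) : Decidable (Spec_generate_leetspeak_alias_py name out) := by unfold Spec_generate_leetspeak_alias_py; infer_instance

-- ===== CLAIM (what is proved, stated in full; the proofs are below) =====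
def Claim_equal_generate_leetspeak_alias_py : Prop := ∀ (name : String), Dom_generate_leetspeak_alias_py name → Spec_generate_leetspeak_alias_py name (generate_leetspeak_alias_py name)

-- ===== LEMMAS AND PROOFS =====

-- A's per-character substitution after the nine replaces, on the list side
def leetSub (ch : Char) : List Char :=
  if ch = '1' then ['i'] else if ch = '3' then ['e'] else if ch = '4' then ['a']
  else if ch = '5' then ['s'] else if ch = '0' then ['o'] else if ch = '@' then ['a']
  else if ch = '$' then ['s'] else if ch = '+' then ['t'] else if ch = '_' then []
  else [ch]

-- replacing a SINGLE character c by r is exactly a character-wise flatMap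
theorem replace_go_single (c : Char) (r : List Char) :
    ∀ (s acc : List Char) (fuel : Nat), s.length ≤ fuel →
      PySem.Chars.replace.go [c] r fuel s acc
        = acc.reverse ++ s.flatMap (fun x => if x = c then r else [x]) := by
  intro s
  induction s with
  | nil =>
      intro acc fuel _
      cases fuel <;> simp [PySem.Chars.replace.go]
  | cons x t ih =>
      intro acc fuel h
      cases fuel with
      | zero => simp at h
      | succ n =>
        simp only [List.length_cons, Nat.succ_le_succ_iff] at h
        by_cases hx : x = c
        · subst hx
          have hpre : List.isPrefixOf [x] (x :: t) = true := by
            simp [List.isPrefixOf]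
          simp only [PySem.Chars.replace.go, hpre, if_true, List.length_cons,
            List.length_nil, List.drop_succ_cons, List.drop_zero]
          rw [ih _ n h]
          simp
        · have hpre : List.isPrefixOf [c] (x :: t) = false := by
            simp only [List.isPrefixOf, Bool.and_true, beq_eq_false_iff_ne, ne_eq]
            exact fun h => hx h.symm
          simp only [PySem.Chars.replace.go, hpre, Bool.false_eq_true, if_false]
          rw [ih _ n h]
          simp [hx]

theorem replace_single (s : List Char) (c : Char) (r : List Char) :
    PySem.Chars.replace s [c] r = s.flatMap (fun x => if x = c then r else [x]) := by
  have := replace_go_single c r s [] s.length le_rfl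
  simpa [PySem.Chars.replace] using this

theorem flatMap_comp {α : Type} (l : List α) (f g : α → List α) :
    (l.flatMap f).flatMap g = l.flatMap (fun x => (f x).flatMap g) := by
  induction l with
  | nil => rfl
  | cons x t ih => simp [List.flatMap_cons, ih]

-- the chain of A's nine single-char replaces, as one flatMap of a composed function
theorem leet_core (s : List Char) :
    generate_leetspeak_alias_py (String.ofList s)
      = String.ofList ((PySem.Chars.lower s).flatMap leetSub) := by
  simp only [generate_leetspeak_alias_py, leetMappingA, List.foldl]
  apply String.toList_inj.mp
  simp only [PySem.Str.toList_replace, PySem.Str.toList_lower, String.toList_ofList]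
  generalize PySem.Chars.lower s = t
  have e1 : ("1" : String).toList = ['1'] := rfl
  have e3 : ("3" : String).toList = ['3'] := rfl
  have e4 : ("4" : String).toList = ['4'] := rfl
  have e5 : ("5" : String).toList = ['5'] := rfl
  have e0 : ("0" : String).toList = ['0'] := rfl
  have ea : ("@" : String).toList = ['@'] := rfl
  have ed : ("$" : String).toList = ['$'] := rfl
  have ep : ("+" : String).toList = ['+'] := rfl
  have eu : ("_" : String).toList = ['_'] := rfl
  rw [e1, e3, e4, e5, e0, ea, ed, ep, eu]
  rw [replace_single, replace_single, replace_single, replace_single, replace_single,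
      replace_single, replace_single, replace_single, replace_single]
  rw [flatMap_comp, flatMap_comp, flatMap_comp, flatMap_comp, flatMap_comp,
      flatMap_comp, flatMap_comp, flatMap_comp]
  apply List.flatMap_congr
  intro x _
  by_cases h1 : x = '1'; · subst h1; decide
  by_cases h3 : x = '3'; · subst h3; decide
  by_cases h4 : x = '4'; · subst h4; decide
  by_cases h5 : x = '5'; · subst h5; decide
  by_cases h0 : x = '0'; · subst h0; decide
  by_cases ha : x = '@'; · subst ha; decide
  by_cases hd : x = '$'; · subst hd; decide
  by_cases hp : x = '+'; · subst hp; decide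
  by_cases hu : x = '_'; · subst hu; decide
  simp only [if_neg h1, if_neg h3, if_neg h4, if_neg h5, if_neg h0, if_neg ha,
    if_neg hd, if_neg hp, if_neg hu, List.flatMap_cons, List.flatMap_nil, List.append_nil]
  simp [leetSub, h1, h3, h4, h5, h0, ha, hd, hp, hu]

-- B's inline ASCII lowering equals PySem's lowerChar
theorem inline_lower_eq (ch : Char) :
    (if 65 ≤ ch.toNat ∧ ch.toNat ≤ 90 then Char.ofNat (ch.toNat + 32) else ch)
      = PySem.Chars.lowerChar ch := by
  have h : ('A' ≤ ch ∧ ch ≤ 'Z') ↔ (65 ≤ ch.toNat ∧ ch.toNat ≤ 90) := by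
    rw [Char.le_def, Char.le_def, UInt32.le_iff_toNat_le, UInt32.le_iff_toNat_le]
    show (65 ≤ ch.val.toNat ∧ ch.val.toNat ≤ 90) ↔ _
    rfl
  simp only [PySem.Chars.lowerChar, PySem.Chars.isupper, Bool.and_eq_true, decide_eq_true_eq, h]

-- B's branch chain on an (already lowered) char produces exactly leetSub
theorem step_eq (d : Char) (out : List Char) :
    (if d = '1' then out ++ ['i']
     else if d = '3' then out ++ ['e']
     else if d = '4' then out ++ ['a']
     else if d = '5' then out ++ ['s']
     else if d = '0' then out ++ ['o']
     else if d = '@' then out ++ ['a']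
     else if d = '$' then out ++ ['s']
     else if d = '+' then out ++ ['t']
     else if d ≠ '_' then out ++ [d]
     else out) = out ++ leetSub d := by
  simp only [leetSub]
  split_ifs <;> simp_all

theorem leetLoopB_eq (s out : List Char) :
    leetLoopB out s = out ++ s.flatMap (fun c => leetSub (PySem.Chars.lowerChar c)) := by
  induction s generalizing out with
  | nil => simp [leetLoopB]
  | cons ch rest ih =>
      simp only [leetLoopB, inline_lower_eq, step_eq, ih, List.flatMap_cons, List.append_assoc]

-- ===== VERDICT (by name: the statement is the Claim_ definition above) =====
theorem generate_leetspeak_alias_py_spec : Claim_equal_generate_leetspeak_alias_py := by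
  intro name _
  unfold Spec_generate_leetspeak_alias_py generate_leetspeak_alias_py_alt
  rw [leetLoopB_eq]
  have h := leet_core name.toList
  simp only [String.ofList_toList] at h
  rw [h]
  simp [PySem.Chars.lower, List.flatMap_map]
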